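-- pv_equiv track=rewrite | github.com/Cesar-Ortiz/Bloch-actividad | actividad-Bloch-master/ComplejosCalcu.py | productoInterno
-- ===== SOURCE A (Python) =====
-- def sumar(num1,num2):
--     a=num1[0]+num2[0]
--     b=num1[1]+num2[1]
--     return(a,b)
--
-- def producto(num1,num2):
--     a=(num1[0]*num2[0])-(num1[1]*num2[1])
--     b=(num1[0]*num2[1])+(num1[1]*num2[0])
--     return(a,b)
--
-- def conjugado(num):
--     return(num[0],-1*num[1])
--
-- def productoInterno(v1,v2):
--     if len(v1) != len(v2):
--         raise ValueError('Los vectores deben tener el mismo tamaño')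
--     else:
--         newV1=[]
--         for x in range(len(v1)):
--             newV1.append(conjugado(v1[x]))
--
--         suma=(0,0)
--         for i in range(len(newV1)):
--             a=producto(newV1[i],v2[i])
--             suma=sumar(suma,a)
--         return (suma)
-- ===== SOURCE B (Python) =====
-- def productoInterno(v1, v2):
--     if len(v1) != len(v2):
--         raise ValueError('Los vectores deben tener el mismo tamaño')
--     pairs = list(zip(v1, v2))
--     def go(lo, hi):
--         if lo >= hi:
--             return (0, 0)
--         if hi - lo == 1:
--             (a, b), (c, d) = pairs[lo]
--             return (a * c + b * d, a * d - b * c)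
--         mid = (lo + hi) // 2
--         rl = go(lo, mid)
--         rr = go(mid, hi)
--         return (rl[0] + rr[0], rl[1] + rr[1])
--     return go(0, len(pairs))
-- ===== Notes on version B (the rewrite author's own statement) =====
-- stated objective: alternative
-- what changed: B zips the two vectors into one pair list and computes the inner product by divide-and-conquer: it recursively splits the index range in half, turns each single pair into the expanded conj(v1[i])*v2[i] value at the leaves, and adds the two half-results, instead of A's two staged index loops (build a conjugated copy of v1, then multiply-and-sum via tuple-algebra helpers into a left accumulator).
import Mathlib
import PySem

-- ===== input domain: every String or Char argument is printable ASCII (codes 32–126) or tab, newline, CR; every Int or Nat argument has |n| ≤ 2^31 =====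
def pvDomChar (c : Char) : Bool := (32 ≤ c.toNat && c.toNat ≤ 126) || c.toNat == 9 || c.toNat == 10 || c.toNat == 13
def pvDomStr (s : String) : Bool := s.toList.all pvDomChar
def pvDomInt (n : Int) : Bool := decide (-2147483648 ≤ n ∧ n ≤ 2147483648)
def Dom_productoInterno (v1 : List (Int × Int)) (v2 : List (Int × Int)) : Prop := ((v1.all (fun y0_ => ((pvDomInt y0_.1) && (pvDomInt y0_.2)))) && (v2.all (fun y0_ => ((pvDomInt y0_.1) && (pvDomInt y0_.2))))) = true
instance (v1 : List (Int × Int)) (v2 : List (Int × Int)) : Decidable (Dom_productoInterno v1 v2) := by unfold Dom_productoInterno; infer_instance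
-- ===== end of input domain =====

-- B computes the inner product by divide-and-conquer over the zipped pair list
-- instead of A's two staged index loops with tuple helpers; objective: alternative.

-- ===== PORT A =====
def sumarL (num1 num2 : Int × Int) : Int × Int :=
  (num1.1 + num2.1, num1.2 + num2.2)

def productoL (num1 num2 : Int × Int) : Int × Int :=
  ((num1.1 * num2.1) - (num1.2 * num2.2), (num1.1 * num2.2) + (num1.2 * num2.1))

def conjugadoL (num : Int × Int) : Int × Int :=
  (num.1, -1 * num.2)

def productoInterno (v1 : List (Int × Int)) (v2 : List (Int × Int)) : Int × Int :=
  if v1.length ≠ v2.length then (0, 0)  -- Python raises ValueError here; excluded by Pre_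
  else
    let newV1 := (PySem.List.pyRange 0 (v1.length : Int) 1).foldl
      (fun acc x => acc ++ [conjugadoL (PySem.List.pyGetD v1 x (0, 0))]) []
    (PySem.List.pyRange 0 (newV1.length : Int) 1).foldl
      (fun suma i =>
        sumarL suma (productoL (PySem.List.pyGetD newV1 i (0, 0)) (PySem.List.pyGetD v2 i (0, 0))))
      (0, 0)

-- ===== PORT B =====
-- divide-and-conquer over the zipped pair list: split the index range in half, expand
-- conj(v1[i])*v2[i] at the leaves, add the half-results
def piGo (pairs : List ((Int × Int) × (Int × Int))) (lo hi : Nat) : Int × Int :=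
  if lo ≥ hi then (0, 0)
  else if hi - lo = 1 then
    -- Python 'pairs[lo]': lo is always in range on piGo's call tree (lo < hi ≤ len pairs)
    let p := pairs.getD lo ((0, 0), (0, 0))
    (p.1.1 * p.2.1 + p.1.2 * p.2.2, p.1.1 * p.2.2 - p.1.2 * p.2.1)
  else
    let mid := (lo + hi) / 2
    let rl := piGo pairs lo mid
    let rr := piGo pairs mid hi
    (rl.1 + rr.1, rl.2 + rr.2)
termination_by hi - lo
decreasing_by all_goals omega

def productoInterno_alt (v1 : List (Int × Int)) (v2 : List (Int × Int)) : Int × Int :=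
  if v1.length ≠ v2.length then (0, 0)  -- Python raises ValueError here; excluded by Pre_
  else
    let pairs := v1.zip v2
    piGo pairs 0 pairs.length

-- ===== PRECONDITION & SPEC =====
-- Pre_ excludes exactly the inputs on which A raises ValueError: vectors of different length.
def Pre_productoInterno (v1 : List (Int × Int)) (v2 : List (Int × Int)) : Prop :=
  v1.length = v2.length
instance (v1 : List (Int × Int)) (v2 : List (Int × Int)) : Decidable (Pre_productoInterno v1 v2) := by
  unfold Pre_productoInterno; infer_instance

def pvWitness_productoInterno : (List (Int × Int)) × (List (Int × Int)) :=
  ([(1, 2), (3, -1)], [(0, 1), (2, 2)])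

def Spec_productoInterno (v1 : List (Int × Int)) (v2 : List (Int × Int)) (out : Int × Int) : Prop := out = productoInterno_alt v1 v2
instance (v1 : List (Int × Int)) (v2 : List (Int × Int)) (out : Int × Int) : Decidable (Spec_productoInterno v1 v2 out) := by unfold Spec_productoInterno; infer_instance

-- ===== CLAIM (what is proved, stated in full; the proofs are below) =====
def Claim_equal_productoInterno : Prop := ∀ (v1 : List (Int × Int)) (v2 : List (Int × Int)), Dom_productoInterno v1 v2 → Pre_productoInterno v1 v2 → Spec_productoInterno v1 v2 (productoInterno v1 v2)

-- ===== LEMMAS AND PROOFS =====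

-- proof-side right-recursive sum of the expanded per-pair values
def pvT : List ((Int × Int) × (Int × Int)) → Int × Int
  | [] => (0, 0)
  | p :: rest =>
    let r := pvT rest
    (p.1.1 * p.2.1 + p.1.2 * p.2.2 + r.1, p.1.1 * p.2.2 - p.1.2 * p.2.1 + r.2)

theorem pvT_append (l1 l2 : List ((Int × Int) × (Int × Int))) :
    pvT (l1 ++ l2) = ((pvT l1).1 + (pvT l2).1, (pvT l1).2 + (pvT l2).2) := by
  induction l1 with
  | nil => simp [pvT]
  | cons hd tl ih =>
    simp only [List.cons_append, pvT, ih]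
    exact Prod.ext_iff.mpr ⟨by ring, by ring⟩

-- A's left accumulator equals pvT, shifted by the initial accumulator
theorem foldl_eq_pvT (l : List ((Int × Int) × (Int × Int))) (acc : Int × Int) :
    l.foldl (fun (s : Int × Int) (p : (Int × Int) × (Int × Int)) =>
        (s.1 + (p.1.1 * p.2.1 + p.1.2 * p.2.2), s.2 + (p.1.1 * p.2.2 - p.1.2 * p.2.1))) acc
      = (acc.1 + (pvT l).1, acc.2 + (pvT l).2) := by
  induction l generalizing acc with
  | nil => simp [pvT]
  | cons hd tl ih =>
    simp only [List.foldl_cons, ih, pvT]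
    exact Prod.ext_iff.mpr ⟨by ring, by ring⟩

-- the divide-and-conquer recursion computes pvT of the addressed sublist
theorem piGo_eq (pairs : List ((Int × Int) × (Int × Int))) :
    ∀ (n lo hi : Nat), hi - lo = n → hi ≤ pairs.length →
      piGo pairs lo hi = pvT ((pairs.drop lo).take (hi - lo)) := by
  intro n
  induction n using Nat.strong_induction_on with
  | _ n ih =>
    intro lo hi hn hle
    rw [piGo]
    split_ifs with h1 h2
    · have : hi - lo = 0 := by omega
      simp [this, pvT]
    · have hlo : lo < pairs.length := by omega
      rw [h2, List.take_one_drop_eq_of_lt_length hlo]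
      simp only [pvT, List.getD_eq_getElem?_getD, List.getElem?_eq_getElem hlo,
        Option.getD_some, List.get_eq_getElem]
      exact Prod.ext_iff.mpr ⟨by ring, by ring⟩
    · have hlt : lo < hi := by omega
      have h2lt : lo + 2 ≤ hi := by omega
      have hmid1 : lo < (lo + hi) / 2 := by omega
      have hmid2 : (lo + hi) / 2 < hi := by omega
      dsimp only
      rw [ih ((lo + hi) / 2 - lo) (by omega) lo ((lo + hi) / 2) rfl (by omega),
          ih (hi - (lo + hi) / 2) (by omega) ((lo + hi) / 2) hi rfl hle]
      have hsplit : (pairs.drop lo).take (hi - lo)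
          = (pairs.drop lo).take ((lo + hi) / 2 - lo)
            ++ (pairs.drop ((lo + hi) / 2)).take (hi - (lo + hi) / 2) := by
        have hsum : hi - lo = ((lo + hi) / 2 - lo) + (hi - (lo + hi) / 2) := by omega
        rw [hsum, List.take_add, List.drop_drop]
        have : lo + ((lo + hi) / 2 - lo) = (lo + hi) / 2 := by omega
        rw [this]
      rw [hsplit, pvT_append]

-- ===== VERDICT (by name: the statement is the Claim_ definition above) =====
theorem productoInterno_spec : Claim_equal_productoInterno := by
  intro v1 v2 _ hpre
  have hlen : v1.length = v2.length := hpre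
  unfold Spec_productoInterno productoInterno productoInterno_alt
  rw [if_neg (by simpa using hpre), if_neg (by simpa using hpre)]
  rw [PySem.List.foldl_append_singleton_eq_map]
  simp only [List.nil_append, List.length_map, PySem.List.length_pyRange_one,
    Int.sub_zero, Int.toNat_natCast]
  have hz : v1.length = (v1.zip v2).length := by
    simp only [List.length_zip]; omega
  rw [hz]
  have hc : (PySem.List.pyRange 0 ((v1.zip v2).length : Int) 1).foldl
      (fun suma i =>
        sumarL suma (productoL
          (PySem.List.pyGetD ((PySem.List.pyRange 0 ((v1.zip v2).length : Int) 1).map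
            (fun x => conjugadoL (PySem.List.pyGetD v1 x (0, 0)))) i (0, 0))
          (PySem.List.pyGetD v2 i (0, 0)))) (0, 0)
      = (PySem.List.pyRange 0 ((v1.zip v2).length : Int) 1).foldl
        (fun (s : Int × Int) i =>
          let p := PySem.List.pyGetD (v1.zip v2) i ((0, 0), (0, 0))
          (s.1 + (p.1.1 * p.2.1 + p.1.2 * p.2.2), s.2 + (p.1.1 * p.2.2 - p.1.2 * p.2.1))) (0, 0) := by
    apply PySem.List.foldl_congr_mem
    intro acc i hi
    rw [PySem.List.mem_pyRange_one] at hi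
    rw [PySem.List.pyGetD_map_pyRange_of_nonneg _ _ _ _ hi.1 hi.2]
    have hget : PySem.List.pyGetD (v1.zip v2) i ((0, 0), (0, 0))
        = (PySem.List.pyGetD v1 i (0, 0), PySem.List.pyGetD v2 i (0, 0)) := by
      rw [PySem.List.pyGetD_eq_getElem _ _ hi.1 hi.2,
          PySem.List.pyGetD_eq_getElem _ _ hi.1 (by omega),
          PySem.List.pyGetD_eq_getElem _ _ hi.1 (by omega)]
      simp [List.getElem_zip]
    simp only [hget, sumarL, productoL, conjugadoL]
    exact Prod.ext_iff.mpr ⟨by ring, by ring⟩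
  rw [hc]
  rw [PySem.List.foldl_pyRange_zero_pyGetD' (v1.zip v2) ((0,0),(0,0))
    (fun (s : Int × Int) (p : (Int × Int) × (Int × Int)) =>
      (s.1 + (p.1.1 * p.2.1 + p.1.2 * p.2.2), s.2 + (p.1.1 * p.2.2 - p.1.2 * p.2.1))) (0, 0)]
  rw [foldl_eq_pvT, piGo_eq (v1.zip v2) ((v1.zip v2).length - 0) 0 (v1.zip v2).length rfl le_rfl,
     Nat.sub_zero, List.drop_zero, List.take_length]
  simp
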